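-- pv_equiv track=rewrite | github.com/d4ndres/herramienta-de-traduccion | resultgpt.py | getMatrixByCoordinates
-- ===== SOURCE A (Python) =====
-- def getMatrixByCoordinates( coordinates ):
--     coords_sorted = sorted(coordinates, key=lambda x: (x[0], x[1]))
--
--     unique_xs = sorted(set([x for x, y in coords_sorted]))
--     unique_ys = sorted(set([y for x, y in coords_sorted]), reverse=True)  # Invertimos para que Y vaya de mayor a menor.
--
--     matrix = [[None for _ in unique_xs] for _ in unique_ys]
--
--     for x, y in coords_sorted:
--         x_index = unique_xs.index(x)
--         y_index = unique_ys.index(y)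
--         matrix[y_index][x_index] = (x, y)
--
--     # revertir el orden de la lista matrix
--     return matrix[::-1]
-- ===== SOURCE B (Python) =====
-- def getMatrixByCoordinates(coordinates):
--     xs = sorted({x for x, y in coordinates})
--     ys = sorted({y for x, y in coordinates})
--     present = {(x, y) for x, y in coordinates}
--     return [[(x, y) if (x, y) in present else None for x in xs] for y in ys]
-- ===== Notes on version B (the rewrite author's own statement) =====
-- stated objective: simpler
-- what changed: A scatters: it pre-allocates a None matrix indexed by descending ys, places each sorted coordinate via two list.index scans, and reverses the matrix at the end; B gathers: it builds a membership set of the coordinates once and emits the matrix directly as a nested comprehension over ys ascending and xs ascending, with no index lookups, no in-place mutation and no final reversal.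
import Mathlib
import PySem

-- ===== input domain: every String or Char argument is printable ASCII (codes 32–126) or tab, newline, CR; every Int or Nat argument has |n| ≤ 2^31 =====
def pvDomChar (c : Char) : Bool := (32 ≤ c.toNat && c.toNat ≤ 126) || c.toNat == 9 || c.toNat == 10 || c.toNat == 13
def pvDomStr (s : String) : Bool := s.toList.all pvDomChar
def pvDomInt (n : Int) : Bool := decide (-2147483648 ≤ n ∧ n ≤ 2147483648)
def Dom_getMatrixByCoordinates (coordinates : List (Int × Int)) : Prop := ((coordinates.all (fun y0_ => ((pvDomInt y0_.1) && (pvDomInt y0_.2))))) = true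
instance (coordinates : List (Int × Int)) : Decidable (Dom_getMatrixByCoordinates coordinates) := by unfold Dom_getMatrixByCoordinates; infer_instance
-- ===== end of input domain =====

-- B replaces A's scatter (pre-allocated None matrix filled per coordinate via .index lookups, then reversed)
-- with a direct gather: a nested comprehension over ys ascending × xs ascending testing a membership set. Objective: simpler.

-- ===== PORT A =====
def getMatrixByCoordinates (coordinates : List (Int × Int)) : List (List (Option (Int × Int))) :=
  let coords_sorted := PySem.List.sorted2 coordinates (fun p => p.1) (fun p => p.2)
  let unique_xs := PySem.List.sorted (PySem.Set.ofList (coords_sorted.map (fun p => p.1))) (fun x => x) false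
  let unique_ys := PySem.List.sorted (PySem.Set.ofList (coords_sorted.map (fun p => p.2))) (fun y => y) true
  let matrix0 := unique_ys.map (fun _ => unique_xs.map (fun _ => (none : Option (Int × Int))))
  let matrix := coords_sorted.foldl (fun m p =>
      m.set ((PySem.List.index? unique_ys p.2).getD 0)
        ((m.getD ((PySem.List.index? unique_ys p.2).getD 0) []).set
          ((PySem.List.index? unique_xs p.1).getD 0) (some p))) matrix0
  matrix.reverse  -- matrix[::-1]

-- ===== PORT B =====
def getMatrixByCoordinates_alt (coordinates : List (Int × Int)) : List (List (Option (Int × Int))) :=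
  let xs := PySem.List.sorted (PySem.Set.ofList (coordinates.map (fun p => p.1))) (fun x => x) false
  let ys := PySem.List.sorted (PySem.Set.ofList (coordinates.map (fun p => p.2))) (fun y => y) false
  let present := PySem.Set.ofList coordinates
  ys.map (fun y => xs.map (fun x =>
    if PySem.Set.contains present (x, y) then some (x, y) else (none : Option (Int × Int))))

-- ===== PRECONDITION & SPEC =====
def Spec_getMatrixByCoordinates (coordinates : List (Int × Int)) (out : List (List (Option (Int × Int)))) : Prop := out = getMatrixByCoordinates_alt coordinates
instance (coordinates : List (Int × Int)) (out : List (List (Option (Int × Int)))) : Decidable (Spec_getMatrixByCoordinates coordinates out) := by unfold Spec_getMatrixByCoordinates; infer_instance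

-- ===== CLAIM (what is proved, stated in full; the proofs are below) =====
def Claim_equal_getMatrixByCoordinates : Prop := ∀ (coordinates : List (Int × Int)), Dom_getMatrixByCoordinates coordinates → Spec_getMatrixByCoordinates coordinates (getMatrixByCoordinates coordinates)

-- ===== LEMMAS AND PROOFS =====

-- the "gather" value of a cell, as a function of the processed coordinate list c
def pvCell (c : List (Int × Int)) (x y : Int) : Option (Int × Int) :=
  if (x, y) ∈ c then some (x, y) else none

def pvTgt (c : List (Int × Int)) (xs ys : List Int) : List (List (Option (Int × Int))) :=
  ys.map (fun y => xs.map (fun x => pvCell c x y))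

-- setting position yi of a map over a Nodup list = a pointwise-changed map
theorem pv_map_set {α β : Type} [DecidableEq α] (ys : List α) (hnd : ys.Nodup)
    (f g : α → β) (yi : Nat) (hlt : yi < ys.length) :
    (ys.map f).set yi (g ys[yi]) = ys.map (fun y => if y = ys[yi] then g y else f y) := by
  apply List.ext_getElem (by simp)
  intro j h1 h2
  have hjy : j < ys.length := by simpa using h2
  simp only [List.getElem_set, List.getElem_map]
  by_cases hj : j = yi
  · subst hj; simp
  · have hne : ys[j] ≠ ys[yi] :=
      fun he => hj ((List.Nodup.getElem_inj_iff hnd).mp he)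
    rw [if_neg (fun h => hj h.symm), if_neg hne]

-- loop invariant of A's scatter fold: it maintains the gather matrix of the processed prefix
theorem pv_fold_inv (xs ys : List Int) (hxnd : xs.Nodup) (hynd : ys.Nodup)
    (c c0 : List (Int × Int)) (hc : ∀ p ∈ c, p.1 ∈ xs ∧ p.2 ∈ ys) :
    c.foldl (fun m p =>
      m.set ((PySem.List.index? ys p.2).getD 0)
        ((m.getD ((PySem.List.index? ys p.2).getD 0) []).set
          ((PySem.List.index? xs p.1).getD 0) (some p))) (pvTgt c0 xs ys)
      = pvTgt (c0 ++ c) xs ys := by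
  induction c generalizing c0 with
  | nil => simp
  | cons p c ih =>
    obtain ⟨hx, hy⟩ := hc p (List.mem_cons_self)
    obtain ⟨xi, hxi⟩ := Option.isSome_iff_exists.mp ((PySem.List.index?_isSome_iff xs p.1).mpr hx)
    obtain ⟨yi, hyi⟩ := Option.isSome_iff_exists.mp ((PySem.List.index?_isSome_iff ys p.2).mpr hy)
    obtain ⟨hxilt, hxe, -⟩ := PySem.List.getElem_of_index?_eq_some hxi
    obtain ⟨hyilt, hye, -⟩ := PySem.List.getElem_of_index?_eq_some hyi
    have hstep : (pvTgt c0 xs ys).set ((PySem.List.index? ys p.2).getD 0)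
        (((pvTgt c0 xs ys).getD ((PySem.List.index? ys p.2).getD 0) []).set
          ((PySem.List.index? xs p.1).getD 0) (some p)) = pvTgt (c0 ++ [p]) xs ys := by
      rw [hxi, hyi]
      simp only [Option.getD_some]
      have hrow : (pvTgt c0 xs ys).getD yi [] = xs.map (fun x => pvCell c0 x p.2) := by
        unfold pvTgt
        rw [List.getD_eq_getElem _ _ (by simpa using hyilt)]
        rw [List.getElem_map, hye]
      rw [hrow]
      have hinner : (xs.map (fun x => pvCell c0 x p.2)).set xi (some p)
          = xs.map (fun x => if x = p.1 then some (x, p.2) else pvCell c0 x p.2) := by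
        have h := pv_map_set xs hxnd (fun x => pvCell c0 x p.2)
          (fun x => some (x, p.2)) xi hxilt
        rw [hxe] at h
        exact h
      rw [hinner]
      have houter := pv_map_set ys hynd (fun y => xs.map (fun x => pvCell c0 x y))
        (fun y => xs.map (fun x => if x = p.1 then some (x, y) else pvCell c0 x y)) yi hyilt
      rw [hye] at houter
      unfold pvTgt
      rw [houter]
      apply List.map_congr_left
      intro y _
      by_cases hyb : y = p.2
      · simp only [hyb, reduceIte]
        apply List.map_congr_left
        intro x _
        by_cases hxa : x = p.1
        · subst hxa
          simp [pvCell]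
        · have hne : (x, p.2) ≠ p := fun he => hxa (congrArg Prod.fst he)
          simp [pvCell, hxa, hne]
      · simp only [if_neg hyb]
        apply List.map_congr_left
        intro x _
        have hne : (x, y) ≠ p := fun he => hyb (congrArg Prod.snd he)
        simp [pvCell, hne]
    rw [List.foldl_cons, hstep, ih (c0 ++ [p]) (fun q hq => hc q (List.mem_cons_of_mem _ hq))]
    simp

-- sorted(set(l₁)) = sorted(set(l₂)) for permuted inputs
theorem pv_sorted_ofList_perm (l₁ l₂ : List Int) (h : l₁.Perm l₂) :
    PySem.List.sorted (PySem.Set.ofList l₁) (fun x => x) false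
      = PySem.List.sorted (PySem.Set.ofList l₂) (fun x => x) false := by
  apply PySem.List.sorted_eq_sorted_of_perm _ _ _ (fun a b hab => hab)
  apply (List.perm_ext_iff_of_nodup (PySem.Set.nodup_ofList l₁) (PySem.Set.nodup_ofList l₂)).mpr
  intro a
  rw [PySem.Set.mem_ofList, PySem.Set.mem_ofList, h.mem_iff]

-- descending sort of set(l₁) = reverse of the ascending sort of set(l₂), for permuted inputs
theorem pv_sorted_rev_eq_reverse (l₁ l₂ : List Int) (h : l₁.Perm l₂) :
    PySem.List.sorted (PySem.Set.ofList l₁) (fun x => x) true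
      = (PySem.List.sorted (PySem.Set.ofList l₂) (fun x => x) false).reverse := by
  apply PySem.List.sorted_rev_eq_of_perm_of_pairwise_gt
  · refine ((List.reverse_perm _).trans ((PySem.List.sorted_perm _ _ _).trans ?_))
    apply (List.perm_ext_iff_of_nodup (PySem.Set.nodup_ofList l₂) (PySem.Set.nodup_ofList l₁)).mpr
    intro a
    rw [PySem.Set.mem_ofList, PySem.Set.mem_ofList, h.mem_iff]
  · exact List.pairwise_reverse.mpr (PySem.List.sorted_ofList_pairwise_lt l₂)

-- ===== VERDICT (by name: the statement is the Claim_ definition above) =====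
theorem getMatrixByCoordinates_spec : Claim_equal_getMatrixByCoordinates := by
  intro coordinates _
  unfold Spec_getMatrixByCoordinates getMatrixByCoordinates getMatrixByCoordinates_alt
  simp only []
  set csorted := PySem.List.sorted2 coordinates (fun p => p.1) (fun p => p.2) with hcs
  have hperm : csorted.Perm coordinates := PySem.List.sorted2_perm coordinates _ _ _
  set X := PySem.List.sorted (PySem.Set.ofList (coordinates.map (fun p => p.1))) (fun x => x) false with hX
  set Y := PySem.List.sorted (PySem.Set.ofList (coordinates.map (fun p => p.2))) (fun y => y) false with hY
  have hux : PySem.List.sorted (PySem.Set.ofList (csorted.map (fun p => p.1))) (fun x => x) false = X :=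
    pv_sorted_ofList_perm _ _ (hperm.map _)
  have huy : PySem.List.sorted (PySem.Set.ofList (csorted.map (fun p => p.2))) (fun y => y) true = Y.reverse :=
    pv_sorted_rev_eq_reverse _ _ (hperm.map _)
  rw [hux, huy]
  have hXnd : X.Nodup := ((PySem.List.sorted_perm _ _ _).nodup_iff).mpr
    (PySem.Set.nodup_ofList _)
  have hYnd : Y.reverse.Nodup := List.nodup_reverse.mpr
    (((PySem.List.sorted_perm _ _ _).nodup_iff).mpr (PySem.Set.nodup_ofList _))
  have hinit : (Y.reverse.map (fun _ => X.map (fun _ => (none : Option (Int × Int)))))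
      = pvTgt [] X Y.reverse := by
    simp [pvTgt, pvCell]
  rw [hinit]
  rw [pv_fold_inv X Y.reverse hXnd hYnd csorted []
    (by
      intro p hp
      have hpc : p ∈ coordinates := hperm.mem_iff.mp hp
      constructor
      · rw [hX, PySem.List.mem_sorted, PySem.Set.mem_ofList]
        exact List.mem_map_of_mem hpc
      · rw [List.mem_reverse, hY, PySem.List.mem_sorted, PySem.Set.mem_ofList]
        exact List.mem_map_of_mem hpc)]
  simp only [List.nil_append]
  unfold pvTgt
  rw [← List.map_reverse, List.reverse_reverse]
  apply List.map_congr_left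
  intro y _
  apply List.map_congr_left
  intro x _
  by_cases h : (x, y) ∈ coordinates
  · simp [pvCell, hperm.mem_iff, h, PySem.Set.mem_ofList]
  · simp [pvCell, hperm.mem_iff, h, PySem.Set.mem_ofList]
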